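-- pv_equiv track=rewrite | github.com/krisanselmo/mountaingpx | wpts/osm.py | get_wpt_type
-- ===== SOURCE A (Python) =====
-- def get_wpt_type(tag_dict):
--     """
--     Purpose: Recuperer le type de POI
--     (Necessaire car les requetes overpass se font maintenant en 2 differents blocs)
--     Return: the waypoint types that will be written into the gpx file
-- 			or empty string if type is not found
--     """
--
--     # OSM node values that it used to identify the waypoint type / Last values have low priority
--     list_of_OSM_values = ['peak', 'saddle', 'volcano', 'attraction', 'toposcope', 'viewpoint',
--         'drinking_water', 'fountain', 'glacier', 'waterfall', 'spring', 'lake',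
--         'guidepost', 'locality', 'observatory', 'cave_entrance',
--         'chapel', 'castle', 'ruins', 'aircraft_wreck', 'toilets', 'tree', 'cairn',
--         'alpine_hut', 'wilderness_hut', 'shelter', 'camp_site', 'hostel', 'hotel']
--     for v in list_of_OSM_values:
--         if v in list(tag_dict.values()):
--             return v
--
--     # OSM node keys that it used to identify the waypoint type (typically with someting like "arbitrary_key"="yes")
--     list_of_OSM_key = ['ford', 'barrier', 'tunnel']
--     for v in list_of_OSM_key:
--         if v in tag_dict.keys():
--             return v
--
--     # For a particular waypoint type name that is not written in OSM db
--     OSM_sac_scale = {'demanding_mountain_hiking':'T3 - ',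
--         'alpine_hiking':'T4 - ',
--         'demanding_alpine_hiking':'T5 - ',
--         'difficult_alpine_hiking':'T6 - '}
--     for k, v in list(OSM_sac_scale.items()):
--         if k in list(tag_dict.values()):
--             return v
--
--     OSM_badly_tagged = {'water':'lake'}
--     for k, v in list(OSM_badly_tagged.items()):
--         if k in list(tag_dict.values()):
--             return v
--
--     return ''
-- ===== SOURCE B (Python) =====
-- # Single indexed pass: each token is looked up in a precomputed rank table and the
-- # minimum-rank candidate wins, instead of 37 sequential membership scans.
--
-- # value-token -> (priority rank, output string); ranks 0..28 from the value list,
-- # 32..35 the sac_scale grades, 36 the badly-tagged 'water'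
-- _VALUE_RANK = {
--     'peak': (0, 'peak'), 'saddle': (1, 'saddle'), 'volcano': (2, 'volcano'),
--     'attraction': (3, 'attraction'), 'toposcope': (4, 'toposcope'),
--     'viewpoint': (5, 'viewpoint'), 'drinking_water': (6, 'drinking_water'),
--     'fountain': (7, 'fountain'), 'glacier': (8, 'glacier'),
--     'waterfall': (9, 'waterfall'), 'spring': (10, 'spring'), 'lake': (11, 'lake'),
--     'guidepost': (12, 'guidepost'), 'locality': (13, 'locality'),
--     'observatory': (14, 'observatory'), 'cave_entrance': (15, 'cave_entrance'),
--     'chapel': (16, 'chapel'), 'castle': (17, 'castle'), 'ruins': (18, 'ruins'),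
--     'aircraft_wreck': (19, 'aircraft_wreck'), 'toilets': (20, 'toilets'),
--     'tree': (21, 'tree'), 'cairn': (22, 'cairn'), 'alpine_hut': (23, 'alpine_hut'),
--     'wilderness_hut': (24, 'wilderness_hut'), 'shelter': (25, 'shelter'),
--     'camp_site': (26, 'camp_site'), 'hostel': (27, 'hostel'), 'hotel': (28, 'hotel'),
--     'demanding_mountain_hiking': (32, 'T3 - '), 'alpine_hiking': (33, 'T4 - '),
--     'demanding_alpine_hiking': (34, 'T5 - '), 'difficult_alpine_hiking': (35, 'T6 - '),
--     'water': (36, 'lake'),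
-- }
--
-- # key-token -> (rank, output); ranks 29..31, between the value list and sac_scale
-- _KEY_RANK = {'ford': (29, 'ford'), 'barrier': (30, 'barrier'), 'tunnel': (31, 'tunnel')}
--
--
-- def get_wpt_type(tag_dict):
--     best = None
--     for k, v in tag_dict.items():
--         for c in (_VALUE_RANK.get(v), _KEY_RANK.get(k)):
--             if c is not None and (best is None or c[0] < best[0]):
--                 best = c
--     return best[1] if best is not None else ''
-- ===== Notes on version B (the rewrite author's own statement) =====
-- stated objective: faster
-- what changed: Replaces A's 37 sequential membership scans over the tag values/keys (four priority blocks) by one precomputed token->(rank, output) table and a single pass over the items keeping the minimum-rank candidate.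
import Mathlib
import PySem

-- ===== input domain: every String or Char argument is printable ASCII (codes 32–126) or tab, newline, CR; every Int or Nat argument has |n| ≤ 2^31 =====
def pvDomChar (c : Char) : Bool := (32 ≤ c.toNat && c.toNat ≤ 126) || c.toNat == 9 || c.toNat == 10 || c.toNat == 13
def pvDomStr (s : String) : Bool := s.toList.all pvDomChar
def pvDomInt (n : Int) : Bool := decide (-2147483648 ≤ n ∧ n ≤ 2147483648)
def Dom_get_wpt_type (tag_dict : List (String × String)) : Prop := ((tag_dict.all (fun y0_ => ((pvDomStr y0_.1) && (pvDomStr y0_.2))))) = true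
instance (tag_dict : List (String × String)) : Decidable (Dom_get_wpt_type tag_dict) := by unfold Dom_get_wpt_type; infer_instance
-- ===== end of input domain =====

-- B replaces A's 37 sequential membership scans by one precomputed rank table and a
-- single minimum-rank pass over the items (objective: faster by a constant factor).

-- ===== PORT A =====
def list_of_OSM_values : List String :=
  ["peak", "saddle", "volcano", "attraction", "toposcope", "viewpoint",
   "drinking_water", "fountain", "glacier", "waterfall", "spring", "lake",
   "guidepost", "locality", "observatory", "cave_entrance",
   "chapel", "castle", "ruins", "aircraft_wreck", "toilets", "tree", "cairn",
   "alpine_hut", "wilderness_hut", "shelter", "camp_site", "hostel", "hotel"]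

def list_of_OSM_key : List String := ["ford", "barrier", "tunnel"]

def OSM_sac_scale : List (String × String) :=
  [("demanding_mountain_hiking", "T3 - "), ("alpine_hiking", "T4 - "),
   ("demanding_alpine_hiking", "T5 - "), ("difficult_alpine_hiking", "T6 - ")]

def OSM_badly_tagged : List (String × String) := [("water", "lake")]

-- 'for v in L: if v in xs: return v'
def loopTokens : List String → List String → Option String
  | [], _ => none
  | v :: rest, xs => if xs.contains v then some v else loopTokens rest xs

-- 'for k, v in L.items(): if k in xs: return v'
def loopPairs : List (String × String) → List String → Option String
  | [], _ => none
  | (k, v) :: rest, xs => if xs.contains k then some v else loopPairs rest xs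

def get_wpt_type (tag_dict : List (String × String)) : String :=
  match loopTokens list_of_OSM_values (tag_dict.map Prod.snd) with
  | some v => v
  | none =>
  match loopTokens list_of_OSM_key (tag_dict.map Prod.fst) with
  | some v => v
  | none =>
  match loopPairs OSM_sac_scale (tag_dict.map Prod.snd) with
  | some v => v
  | none =>
  match loopPairs OSM_badly_tagged (tag_dict.map Prod.snd) with
  | some v => v
  | none => ""

-- ===== PORT B =====
def VALUE_RANK : List (String × Nat × String) :=
  [("peak", 0, "peak"), ("saddle", 1, "saddle"), ("volcano", 2, "volcano"),
   ("attraction", 3, "attraction"), ("toposcope", 4, "toposcope"),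
   ("viewpoint", 5, "viewpoint"), ("drinking_water", 6, "drinking_water"),
   ("fountain", 7, "fountain"), ("glacier", 8, "glacier"),
   ("waterfall", 9, "waterfall"), ("spring", 10, "spring"), ("lake", 11, "lake"),
   ("guidepost", 12, "guidepost"), ("locality", 13, "locality"),
   ("observatory", 14, "observatory"), ("cave_entrance", 15, "cave_entrance"),
   ("chapel", 16, "chapel"), ("castle", 17, "castle"), ("ruins", 18, "ruins"),
   ("aircraft_wreck", 19, "aircraft_wreck"), ("toilets", 20, "toilets"),
   ("tree", 21, "tree"), ("cairn", 22, "cairn"), ("alpine_hut", 23, "alpine_hut"),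
   ("wilderness_hut", 24, "wilderness_hut"), ("shelter", 25, "shelter"),
   ("camp_site", 26, "camp_site"), ("hostel", 27, "hostel"), ("hotel", 28, "hotel"),
   ("demanding_mountain_hiking", 32, "T3 - "), ("alpine_hiking", 33, "T4 - "),
   ("demanding_alpine_hiking", 34, "T5 - "), ("difficult_alpine_hiking", 35, "T6 - "),
   ("water", 36, "lake")]

def KEY_RANK : List (String × Nat × String) :=
  [("ford", 29, "ford"), ("barrier", 30, "barrier"), ("tunnel", 31, "tunnel")]

-- dict.get: first (only) binding of the token, as (rank, output)
def rankGet (m : List (String × Nat × String)) (t : String) : Option (Nat × String) :=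
  (m.find? (fun p => p.1 == t)).map Prod.snd

-- 'if c is not None and (best is None or c[0] < best[0]): best = c'
def updBest (best : Option (Nat × String)) (c : Option (Nat × String)) : Option (Nat × String) :=
  match c with
  | none => best
  | some c =>
    match best with
    | none => some c
    | some b => if c.1 < b.1 then some c else some b

def get_wpt_type_alt (tag_dict : List (String × String)) : String :=
  match tag_dict.foldl
      (fun best kv => updBest (updBest best (rankGet VALUE_RANK kv.2)) (rankGet KEY_RANK kv.1))
      none with
  | some b => b.2
  | none => ""

-- ===== PRECONDITION & SPEC =====
def Spec_get_wpt_type (tag_dict : List (String × String)) (out : String) : Prop := out = get_wpt_type_alt tag_dict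
instance (tag_dict : List (String × String)) (out : String) : Decidable (Spec_get_wpt_type tag_dict out) := by unfold Spec_get_wpt_type; infer_instance

-- ===== CLAIM (what is proved, stated in full; the proofs are below) =====
def Claim_equal_get_wpt_type : Prop := ∀ (tag_dict : List (String × String)), Dom_get_wpt_type tag_dict → Spec_get_wpt_type tag_dict (get_wpt_type tag_dict)

-- ===== LEMMAS AND PROOFS =====

-- The 37 tests of A, in priority order: (is-key-test?, token, output).
def prioAll : List (Bool × String × String) :=
  [(false, "peak", "peak"), (false, "saddle", "saddle"), (false, "volcano", "volcano"),
   (false, "attraction", "attraction"), (false, "toposcope", "toposcope"),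
   (false, "viewpoint", "viewpoint"), (false, "drinking_water", "drinking_water"),
   (false, "fountain", "fountain"), (false, "glacier", "glacier"),
   (false, "waterfall", "waterfall"), (false, "spring", "spring"), (false, "lake", "lake"),
   (false, "guidepost", "guidepost"), (false, "locality", "locality"),
   (false, "observatory", "observatory"), (false, "cave_entrance", "cave_entrance"),
   (false, "chapel", "chapel"), (false, "castle", "castle"), (false, "ruins", "ruins"),
   (false, "aircraft_wreck", "aircraft_wreck"), (false, "toilets", "toilets"),
   (false, "tree", "tree"), (false, "cairn", "cairn"), (false, "alpine_hut", "alpine_hut"),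
   (false, "wilderness_hut", "wilderness_hut"), (false, "shelter", "shelter"),
   (false, "camp_site", "camp_site"), (false, "hostel", "hostel"), (false, "hotel", "hotel"),
   (true, "ford", "ford"), (true, "barrier", "barrier"), (true, "tunnel", "tunnel"),
   (false, "demanding_mountain_hiking", "T3 - "), (false, "alpine_hiking", "T4 - "),
   (false, "demanding_alpine_hiking", "T5 - "), (false, "difficult_alpine_hiking", "T6 - "),
   (false, "water", "lake")]

-- first entry (from index i on) whose token occurs in the right projection of td
def mfind : List (Bool × String × String) → Nat → List (String × String) → Option (Nat × String)
  | [], _, _ => none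
  | e :: es, i, td =>
    if (if e.1 then td.map Prod.fst else td.map Prod.snd).contains e.2.1
    then some (i, e.2.2) else mfind es (i + 1) td

-- the rank table derived from the entry list (b = key-entries or value-entries)
def dTab (b : Bool) : List (Bool × String × String) → Nat → List (String × Nat × String)
  | [], _ => []
  | e :: es, i => if e.1 == b then (e.2.1, i, e.2.2) :: dTab b es (i + 1) else dTab b es (i + 1)

def render : Option (Nat × String) → String
  | some b => b.2
  | none => ""

theorem updBest_none_left (c : Option (Nat × String)) : updBest none c = c := by
  cases c <;> rfl

theorem updBest_some_some (x y : Nat × String) :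
    updBest (some x) (some y) = if y.1 < x.1 then some y else some x := rfl

theorem updBest_assoc (a b c : Option (Nat × String)) :
    updBest (updBest a b) c = updBest a (updBest b c) := by
  rcases b with _ | ⟨rb, ob⟩
  · show updBest a c = updBest a (updBest none c)
    rw [updBest_none_left]
  rcases c with _ | ⟨rc, oc⟩
  · rfl
  rcases a with _ | ⟨ra, oa⟩
  · rw [updBest_none_left, updBest_none_left]
  simp only [updBest_some_some]
  rw [apply_ite (fun x => updBest x (some (rc, oc))), apply_ite (fun x => updBest (some (ra, oa)) x)]
  simp only [updBest_some_some]
  split_ifs <;> first | rfl | omega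

theorem rankGet_dTab_le (b : Bool) (E : List (Bool × String × String)) (i : Nat)
    (t : String) (r : Nat) (o : String) (h : rankGet (dTab b E i) t = some (r, o)) : i ≤ r := by
  induction E generalizing i with
  | nil => simp [rankGet, dTab] at h
  | cons e es ih =>
    rw [dTab] at h
    split at h
    · rw [rankGet, List.find?] at h
      by_cases ht : e.2.1 == t
      · simp only [ht, Option.map_some] at h
        rw [Option.some.injEq, Prod.mk.injEq] at h
        omega
      · simp only [ht] at h
        exact le_trans (Nat.le_succ i) (ih (i + 1) h)
    · exact le_trans (Nat.le_succ i) (ih (i + 1) h)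

theorem mfind_le (E : List (Bool × String × String)) (i : Nat) (td : List (String × String))
    (r : Nat) (o : String) (h : mfind E i td = some (r, o)) : i ≤ r := by
  induction E generalizing i with
  | nil => simp [mfind] at h
  | cons e es ih =>
    rw [mfind] at h
    split at h <;> split at h <;>
      first
        | (rw [Option.some.injEq, Prod.mk.injEq] at h; omega)
        | exact le_trans (Nat.le_succ i) (ih (i + 1) h)

theorem rankGet_cons (t : String) (r : Nat) (o : String) (m : List (String × Nat × String))
    (s : String) :
    rankGet ((t, r, o) :: m) s = if t == s then some (r, o) else rankGet m s := by
  by_cases h : t == s <;> simp [rankGet, List.find?, h]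

theorem single_item (E : List (Bool × String × String)) (i : Nat) (k v : String) :
    updBest (updBest none (rankGet (dTab false E i) v)) (rankGet (dTab true E i) k)
      = mfind E i [(k, v)] := by
  induction E generalizing i with
  | nil => simp [dTab, rankGet, mfind, updBest]
  | cons e es ih =>
    rcases e with ⟨ik, tok, out⟩
    cases ik with
    | false =>
      rw [show dTab false ((false, tok, out) :: es) i
            = (tok, i, out) :: dTab false es (i + 1) from by simp [dTab],
          show dTab true ((false, tok, out) :: es) i = dTab true es (i + 1) from by simp [dTab],
          show mfind ((false, tok, out) :: es) i [(k, v)]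
            = if ((tok == v : Bool)) then some (i, out) else mfind es (i + 1) [(k, v)] from by
              simp [mfind],
          rankGet_cons]
      by_cases hv : tok == v
      · rw [if_pos hv, if_pos hv, updBest_none_left]
        cases hkr : rankGet (dTab true es (i + 1)) k with
        | none => rfl
        | some p =>
          rcases p with ⟨r, o⟩
          have := rankGet_dTab_le true es (i + 1) k r o hkr
          rw [updBest_some_some, if_neg (by omega)]
      · rw [if_neg hv, if_neg hv]
        exact ih (i + 1)
    | true =>
      rw [show dTab true ((true, tok, out) :: es) i
            = (tok, i, out) :: dTab true es (i + 1) from by simp [dTab],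
          show dTab false ((true, tok, out) :: es) i = dTab false es (i + 1) from by simp [dTab],
          show mfind ((true, tok, out) :: es) i [(k, v)]
            = if ((tok == k : Bool)) then some (i, out) else mfind es (i + 1) [(k, v)] from by
              simp [mfind],
          rankGet_cons]
      by_cases hk : tok == k
      · rw [if_pos hk, if_pos hk, updBest_none_left]
        cases hvr : rankGet (dTab false es (i + 1)) v with
        | none => rfl
        | some p =>
          rcases p with ⟨r, o⟩
          have := rankGet_dTab_le false es (i + 1) v r o hvr
          rw [updBest_some_some, if_pos (by omega)]
      · rw [if_neg hk, if_neg hk]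
        exact ih (i + 1)

theorem mfind_cons_entry (ik : Bool) (tok out : String) (es : List (Bool × String × String))
    (i : Nat) (td : List (String × String)) :
    mfind ((ik, tok, out) :: es) i td
      = if (if ik then td.map Prod.fst else td.map Prod.snd).contains tok
        then some (i, out) else mfind es (i + 1) td := rfl

theorem mfind_cons (E : List (Bool × String × String)) (i : Nat)
    (kv : String × String) (rest : List (String × String)) :
    mfind E i (kv :: rest) = updBest (mfind E i [kv]) (mfind E i rest) := by
  induction E generalizing i with
  | nil => simp [mfind, updBest]
  | cons e es ih =>
    rcases e with ⟨ik, tok, out⟩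
    simp only [mfind_cons_entry]
    have hcons : ((if ik then (kv :: rest).map Prod.fst else (kv :: rest).map Prod.snd).contains tok)
        = (((if ik then [kv].map Prod.fst else [kv].map Prod.snd).contains tok)
            || ((if ik then rest.map Prod.fst else rest.map Prod.snd).contains tok)) := by
      cases ik <;> simp [Bool.beq_eq_decide_eq]
    rw [hcons]
    by_cases h1 : ((if ik then [kv].map Prod.fst else [kv].map Prod.snd).contains tok) = true
    · simp only [h1, Bool.true_or, if_true]
      by_cases h2 : ((if ik then rest.map Prod.fst else rest.map Prod.snd).contains tok) = true
      · simp only [h2, if_true]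
        rw [updBest_some_some, if_neg (by omega)]
      · simp only [h2, Bool.false_eq_true, if_false]
        cases hy : mfind es (i + 1) rest with
        | none => rfl
        | some p =>
          rcases p with ⟨r, o⟩
          have := mfind_le es (i + 1) rest r o hy
          rw [updBest_some_some, if_neg (by omega)]
    · simp only [h1, Bool.false_eq_true, Bool.false_or, if_false]
      by_cases h2 : ((if ik then rest.map Prod.fst else rest.map Prod.snd).contains tok) = true
      · simp only [h2, if_true]
        cases hy : mfind es (i + 1) [kv] with
        | none => rw [updBest_none_left]
        | some p =>
          rcases p with ⟨r, o⟩
          have := mfind_le es (i + 1) [kv] r o hy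
          rw [updBest_some_some, if_pos (by omega)]
      · simp only [h2, Bool.false_eq_true, if_false]
        exact ih (i + 1)

theorem mfind_nil (E : List (Bool × String × String)) (i : Nat) : mfind E i [] = none := by
  induction E generalizing i with
  | nil => rfl
  | cons e es ih => simp [mfind, ih]

theorem fold_mfind (E : List (Bool × String × String)) (i : Nat)
    (td : List (String × String)) (acc : Option (Nat × String)) :
    td.foldl (fun best kv =>
        updBest (updBest best (rankGet (dTab false E i) kv.2)) (rankGet (dTab true E i) kv.1)) acc
      = updBest acc (mfind E i td) := by
  induction td generalizing acc with
  | nil => rw [List.foldl_nil, mfind_nil]; cases acc <;> rfl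
  | cons kv rest ih =>
    simp only [List.foldl_cons]
    rw [ih, mfind_cons, ← single_item E i kv.1 kv.2, updBest_none_left,
      updBest_assoc, updBest_assoc, updBest_assoc]

theorem b_eq (td : List (String × String)) : get_wpt_type_alt td = render (mfind prioAll 0 td) := by
  have hv : VALUE_RANK = dTab false prioAll 0 := by rfl
  have hk : KEY_RANK = dTab true prioAll 0 := by rfl
  unfold get_wpt_type_alt
  rw [hv, hk, fold_mfind, updBest_none_left]
  cases mfind prioAll 0 td with
  | none => rfl
  | some b => rfl


theorem seg_vals (L : List String) (E : List (Bool × String × String)) (i : Nat)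
    (td : List (String × String)) :
    render (mfind (L.map (fun t => (false, t, t)) ++ E) i td)
      = match loopTokens L (td.map Prod.snd) with
        | some v => v
        | none => render (mfind E (i + L.length) td) := by
  induction L generalizing i with
  | nil => simp [loopTokens]
  | cons t L ihl =>
    simp only [List.map_cons, List.cons_append, mfind_cons_entry, loopTokens,
      Bool.false_eq_true, if_false]
    by_cases h : ((td.map Prod.snd).contains t) = true
    · simp only [h, if_true, render]
    · simp only [h, Bool.false_eq_true, if_false, ihl (i + 1), List.length_cons]
      have : i + 1 + L.length = i + (L.length + 1) := by omega
      rw [this]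

theorem seg_keys (L : List String) (E : List (Bool × String × String)) (i : Nat)
    (td : List (String × String)) :
    render (mfind (L.map (fun t => (true, t, t)) ++ E) i td)
      = match loopTokens L (td.map Prod.fst) with
        | some v => v
        | none => render (mfind E (i + L.length) td) := by
  induction L generalizing i with
  | nil => simp [loopTokens]
  | cons t L ihl =>
    simp only [List.map_cons, List.cons_append, mfind_cons_entry, loopTokens, if_true]
    by_cases h : ((td.map Prod.fst).contains t) = true
    · simp only [h, if_true, render]
    · simp only [h, Bool.false_eq_true, if_false, ihl (i + 1), List.length_cons]
      have : i + 1 + L.length = i + (L.length + 1) := by omega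
      rw [this]

theorem seg_pairs (P : List (String × String)) (E : List (Bool × String × String)) (i : Nat)
    (td : List (String × String)) :
    render (mfind (P.map (fun p => (false, p.1, p.2)) ++ E) i td)
      = match loopPairs P (td.map Prod.snd) with
        | some v => v
        | none => render (mfind E (i + P.length) td) := by
  induction P generalizing i with
  | nil => simp [loopPairs]
  | cons p P ihl =>
    rcases p with ⟨pk, pv⟩
    simp only [List.map_cons, List.cons_append, mfind_cons_entry, loopPairs,
      Bool.false_eq_true, if_false]
    by_cases h : ((td.map Prod.snd).contains pk) = true
    · simp only [h, if_true, render]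
    · simp only [h, Bool.false_eq_true, if_false, ihl (i + 1), List.length_cons]
      have : i + 1 + P.length = i + (P.length + 1) := by omega
      rw [this]

theorem a_eq (td : List (String × String)) : get_wpt_type td = render (mfind prioAll 0 td) := by
  have hsplit : prioAll
      = list_of_OSM_values.map (fun t => (false, t, t))
        ++ (list_of_OSM_key.map (fun t => (true, t, t))
        ++ (OSM_sac_scale.map (fun p => (false, p.1, p.2))
        ++ (OSM_badly_tagged.map (fun p => (false, p.1, p.2)) ++ []))) := by rfl
  rw [hsplit, seg_vals, seg_keys, seg_pairs, seg_pairs]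
  rfl

-- ===== VERDICT (by name: the statement is the Claim_ definition above) =====
theorem get_wpt_type_spec : Claim_equal_get_wpt_type := by
  intro td _
  unfold Spec_get_wpt_type
  rw [a_eq, b_eq]
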